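-- pv_equiv track=rewrite | github.com/mohamedmehdawy/leetcode_problems | Problem #1 Manual System Stack/master.py | f_stk_class_style
-- ===== SOURCE A (Python) =====
-- def f_stk_class_style(n):
--     if n <= 1:
--         return 5
--
--     class RecursiveCall:
--         def __init__(self,n, result = 0, is_completed=False) -> None:
--             self.n = n
--             self.result = result
--             self.is_completed = is_completed
--
--     stack = [RecursiveCall(n)]
--
--     while stack:
--         # get last call data
--         last_call = stack[-1]
--         n, result, is_completed = last_call.n, last_call.result, last_call.is_completed
--
--         if not is_completed:
--
--             # check last call
--             if n <= 1:
--                 stack.append(RecursiveCall(n, 5, True))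
--             elif n % 3 == 0:
--                 stack.append(RecursiveCall(n-1-n%3, 6))
--             else:
--                 stack.append(RecursiveCall(n-1-n%2, 8))
--         else:
--             stack.pop()
--
--             if not stack:
--                 return result
--
--             stack[-1].result += result
--             stack[-1].is_completed = True
-- ===== SOURCE B (Python) =====
-- def f_stk_class_style(n):
--     if n <= 1:
--         return 5
--     return 5 * n + (3, 0, 3, 4, 7, 2)[n % 6]
-- ===== Notes on version B (the rewrite author's own statement) =====
-- stated objective: faster
-- what changed: Replaced A's explicit-stack simulation of the descending recursion (O(n) steps and an O(n)-deep stack) by the closed form 5*n + [3,0,3,4,7,2][n % 6], derived from the walk adding 30 per period of 6.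
import Mathlib
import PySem

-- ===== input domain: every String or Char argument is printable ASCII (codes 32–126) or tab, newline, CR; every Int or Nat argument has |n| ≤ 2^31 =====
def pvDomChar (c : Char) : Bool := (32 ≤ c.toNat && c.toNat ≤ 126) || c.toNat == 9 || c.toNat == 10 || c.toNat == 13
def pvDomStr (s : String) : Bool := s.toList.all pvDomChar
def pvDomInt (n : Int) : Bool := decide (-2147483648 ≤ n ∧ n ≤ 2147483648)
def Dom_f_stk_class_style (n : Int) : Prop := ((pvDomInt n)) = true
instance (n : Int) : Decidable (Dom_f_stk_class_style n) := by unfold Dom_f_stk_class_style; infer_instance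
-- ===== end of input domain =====

-- B replaces A's explicit-stack simulation of the descending walk by the closed form
-- 5*n + (3,0,3,4,7,2)[n % 6] (objective: faster — the walk adds 30 per period of 6).

-- ===== PORT A =====
-- A stack frame is (n, result, is_completed); the list head is Python's stack[-1].
-- `%` on Int agrees with Python's `%` for the positive divisors 2 and 3 used here.
def f_stk_loop : List (Int × Int × Bool) → Int
  | [] => 0   -- unreachable: the Python `while stack` never exits without returning
  | (m, r, false) :: rest =>
      if m ≤ 1 then f_stk_loop ((m, 5, true) :: (m, r, false) :: rest)
      else if m % 3 = 0 then f_stk_loop ((m - 1 - m % 3, 6, false) :: (m, r, false) :: rest)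
      else f_stk_loop ((m - 1 - m % 2, 8, false) :: (m, r, false) :: rest)
  | (_, r, true) :: [] => r
  | (_, r, true) :: (pn, pr, _) :: rest' => f_stk_loop ((pn, pr + r, true) :: rest')
termination_by stack =>
  ((match stack with
    | [] => 0
    | (m, _, c) :: _ => if c then 0 else m.toNat + 1 : Nat), stack.length)
decreasing_by
  all_goals simp only [if_true, if_false, List.length]
  · exact Prod.Lex.left _ _ (by omega)
  · exact Prod.Lex.left _ _ (by omega)
  · exact Prod.Lex.left _ _ (by omega)
  · exact Prod.Lex.right _ (by omega)

def f_stk_class_style (n : Int) : Int :=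
  if n ≤ 1 then 5 else f_stk_loop [(n, 0, false)]

-- ===== PORT B =====
def f_stk_class_style_alt (n : Int) : Int :=
  if n ≤ 1 then 5
  else 5 * n +
    (if n % 6 = 0 then 3 else if n % 6 = 1 then 0 else if n % 6 = 2 then 3
     else if n % 6 = 3 then 4 else if n % 6 = 4 then 7 else 2)

-- ===== PRECONDITION & SPEC =====
def Spec_f_stk_class_style (n : Int) (out : Int) : Prop := out = f_stk_class_style_alt n
instance (n : Int) (out : Int) : Decidable (Spec_f_stk_class_style n out) := by unfold Spec_f_stk_class_style; infer_instance

-- ===== CLAIM (what is proved, stated in full; the proofs are below) =====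
def Claim_equal_f_stk_class_style : Prop := ∀ (n : Int), Dom_f_stk_class_style n → Spec_f_stk_class_style n (f_stk_class_style n)

-- ===== LEMMAS AND PROOFS =====

-- The recursion A's stack simulates: g n = 5 for n ≤ 1, else 6 + g (n-1) when 3 ∣ n,
-- else 8 + g (n - 1 - n % 2).
def gAux (n : Int) : Int :=
  if h : n ≤ 1 then 5
  else if n % 3 = 0 then 6 + gAux (n - 1)
  else 8 + gAux (n - 1 - n % 2)
termination_by n.toNat
decreasing_by all_goals omega

lemma gAux_base {n : Int} (h : n ≤ 1) : gAux n = 5 := by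
  rw [gAux, dif_pos h]

lemma gAux_div3 {n : Int} (h : ¬ n ≤ 1) (h3 : n % 3 = 0) : gAux n = 6 + gAux (n - 1) := by
  rw [gAux, dif_neg h, if_pos h3]

lemma gAux_ndiv3 {n : Int} (h : ¬ n ≤ 1) (h3 : ¬ n % 3 = 0) :
    gAux n = 8 + gAux (n - 1 - n % 2) := by
  rw [gAux, dif_neg h, if_neg h3]

-- Running the stack loop on an uncompleted frame completes it with gAux of its n added.
lemma loop_frame (k : Nat) : ∀ (m r : Int), m.toNat ≤ k → ∀ rest,
    f_stk_loop ((m, r, false) :: rest) = f_stk_loop ((m, r + gAux m, true) :: rest) := by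
  induction k with
  | zero =>
    intro m r hm rest
    have hle : m ≤ 1 := by omega
    rw [f_stk_loop, if_pos hle, f_stk_loop, gAux_base hle]
  | succ k ih =>
    intro m r hm rest
    by_cases hle : m ≤ 1
    · rw [f_stk_loop, if_pos hle, f_stk_loop, gAux_base hle]
    · rw [f_stk_loop, if_neg hle]
      by_cases h3 : m % 3 = 0
      · have e : m - 1 - m % 3 = m - 1 := by omega
        rw [if_pos h3, e, ih (m - 1) 6 (by omega) _, f_stk_loop, gAux_div3 hle h3]
      · rw [if_neg h3, ih (m - 1 - m % 2) 8 (by omega) _, f_stk_loop, gAux_ndiv3 hle h3]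

lemma gAux_eq_alt (k : Nat) : ∀ (n : Int), n.toNat ≤ k → gAux n = f_stk_class_style_alt n := by
  induction k with
  | zero =>
    intro n hn
    have hle : n ≤ 1 := by omega
    rw [gAux_base hle, f_stk_class_style_alt, if_pos hle]
  | succ k ih =>
    intro n hn
    by_cases hle : n ≤ 1
    · rw [gAux_base hle, f_stk_class_style_alt, if_pos hle]
    · by_cases h3 : n % 3 = 0
      · rw [gAux_div3 hle h3, ih (n - 1) (by omega)]
        unfold f_stk_class_style_alt
        split_ifs <;> omega
      · rw [gAux_ndiv3 hle h3, ih (n - 1 - n % 2) (by omega)]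
        unfold f_stk_class_style_alt
        split_ifs <;> omega

-- ===== VERDICT (by name: the statement is the Claim_ definition above) =====
theorem f_stk_class_style_spec : Claim_equal_f_stk_class_style := by
  intro n _
  unfold Spec_f_stk_class_style f_stk_class_style
  by_cases hle : n ≤ 1
  · rw [if_pos hle, f_stk_class_style_alt, if_pos hle]
  · rw [if_neg hle, loop_frame n.toNat n 0 le_rfl [], f_stk_loop,
      gAux_eq_alt n.toNat n le_rfl]
    exact zero_add _
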